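-- pv_equiv track=rewrite | github.com/tylerhero359-ux/props_yarn | injury_service.py | _extract_team_remainder
-- ===== SOURCE A (Python) =====
-- def _extract_team_remainder(text_line: str, compact_team: str) -> str:
--     compact_seen = ""
--     for idx, char in enumerate(text_line):
--         if char.isspace():
--             continue
--         compact_seen += char
--         if compact_seen.lower() == compact_team.lower():
--             return text_line[idx + 1 :].strip()
--         if not compact_team.lower().startswith(compact_seen.lower()):
--             break
--     return text_line.strip()
-- ===== SOURCE B (Python) =====
-- def _extract_team_remainder(text_line: str, compact_team: str) -> str:
--     positions = [i for i, c in enumerate(text_line) if not c.isspace()]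
--     n = len(compact_team)
--     compact = ''.join(text_line[i] for i in positions[:n])
--     if n > 0 and len(positions) >= n and compact.lower() == compact_team.lower():
--         return text_line[positions[n - 1] + 1:].strip()
--     return text_line.strip()
-- ===== Notes on version B (the rewrite author's own statement) =====
-- stated objective: alternative
-- what changed: B precomputes the full table of non-space positions, takes the first n of them to rebuild the compact prefix, compares it once against the team name and slices after the n-th position, replacing A's interleaved scan-with-accumulator that matches, extends and breaks inside the loop.
import Mathlib
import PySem

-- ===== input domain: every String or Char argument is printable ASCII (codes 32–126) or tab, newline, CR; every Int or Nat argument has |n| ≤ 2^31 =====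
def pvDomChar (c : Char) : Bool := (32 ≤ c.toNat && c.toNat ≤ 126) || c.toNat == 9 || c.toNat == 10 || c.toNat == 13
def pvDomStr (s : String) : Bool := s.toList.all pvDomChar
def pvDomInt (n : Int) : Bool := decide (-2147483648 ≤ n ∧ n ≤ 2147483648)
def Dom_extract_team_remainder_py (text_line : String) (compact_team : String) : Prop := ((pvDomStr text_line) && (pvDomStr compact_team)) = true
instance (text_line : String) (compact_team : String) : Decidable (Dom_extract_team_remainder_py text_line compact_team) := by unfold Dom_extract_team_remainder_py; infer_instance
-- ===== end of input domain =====

-- B precomputes the table of non-space positions, then compares the first n of them and slices once,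
-- instead of A's interleaved scan-match-and-break loop (objective: alternative decomposition, same cost).


-- ===== PORT A =====
-- the `for idx, char in enumerate(text_line)` loop: structural recursion over the remaining
-- characters, carrying the running index `idx` and the accumulator `compact_seen`
def pvLoopA (text tlow : List Char) : List Char → Nat → List Char → List Char
  | [], _, _ => PySem.Chars.strip text
  | ch :: rest, idx, seen =>
      if PySem.Chars.isspace ch then pvLoopA text tlow rest (idx + 1) seen
      else
        let seen' := seen ++ [ch]
        if PySem.Chars.lower seen' = tlow then
          PySem.Chars.strip (PySem.List.slice text (some ((idx : Int) + 1)) none)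
        else if PySem.Chars.startswith tlow (PySem.Chars.lower seen') then
          pvLoopA text tlow rest (idx + 1) seen'
        else PySem.Chars.strip text

def extract_team_remainder_py (text_line : String) (compact_team : String) : String :=
  String.ofList (pvLoopA text_line.toList (PySem.Chars.lower compact_team.toList) text_line.toList 0 [])

-- ===== PORT B =====
-- `[i for i, c in enumerate(text_line) if not c.isspace()]`
def pvPositions : List Char → Nat → List Nat
  | [], _ => []
  | c :: cs, i => if PySem.Chars.isspace c then pvPositions cs (i + 1) else i :: pvPositions cs (i + 1)

def extract_team_remainder_py_alt (text_line : String) (compact_team : String) : String :=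
  let tl := text_line.toList
  let positions := pvPositions tl 0
  let n := compact_team.toList.length
  -- ''.join(text_line[i] for i in positions[:n]); every i in positions is in range, so getD is exact
  let compact := (positions.take n).map (fun i => tl.getD i ' ')
  if n ≠ 0 ∧ n ≤ positions.length ∧ PySem.Chars.lower compact = PySem.Chars.lower compact_team.toList then
    String.ofList (PySem.Chars.strip (tl.drop (positions.getD (n - 1) 0 + 1)))
  else
    String.ofList (PySem.Chars.strip tl)

-- ===== PRECONDITION & SPEC =====
def Spec_extract_team_remainder_py (text_line : String) (compact_team : String) (out : String) : Prop := out = extract_team_remainder_py_alt text_line compact_team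
instance (text_line : String) (compact_team : String) (out : String) : Decidable (Spec_extract_team_remainder_py text_line compact_team out) := by unfold Spec_extract_team_remainder_py; infer_instance

-- ===== CLAIM (what is proved, stated in full; the proofs are below) =====
def Claim_equal_extract_team_remainder_py : Prop := ∀ (text_line : String) (compact_team : String), Dom_extract_team_remainder_py text_line compact_team → Spec_extract_team_remainder_py text_line compact_team (extract_team_remainder_py text_line compact_team)

-- ===== LEMMAS AND PROOFS =====

theorem pvPositions_map_getD (text : List Char) :
    ∀ (cs : List Char) (base : Nat), text.drop base = cs →
    (pvPositions cs base).map (fun i => text.getD i ' ') = cs.filter (fun c => !PySem.Chars.isspace c)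
  | [], _, _ => rfl
  | c :: cs, base, h => by
      have hget : text.getD base ' ' = c := by
        have h0 : text[base]? = some c := by
          rw [← Nat.add_zero base, ← List.getElem?_drop, h]; rfl
        simp [List.getD, h0]
      have htail : text.drop (base + 1) = cs := by
        rw [← List.drop_drop, h, List.drop_one, List.tail_cons]
      have ih := pvPositions_map_getD text cs (base + 1) htail
      by_cases hs : PySem.Chars.isspace c
      · rw [pvPositions, if_pos hs, List.filter_cons_of_neg (by simp [hs])]
        exact ih
      · rw [pvPositions, if_neg hs, List.map_cons, List.filter_cons_of_pos (by simp [hs]), hget, ih]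

theorem pvPositions_length : ∀ (cs : List Char) (base : Nat),
    (pvPositions cs base).length = (cs.filter (fun c => !PySem.Chars.isspace c)).length
  | [], _ => rfl
  | c :: cs, base => by
      by_cases hs : PySem.Chars.isspace c
      · rw [pvPositions, if_pos hs, List.filter_cons_of_neg (by simp [hs])]
        exact pvPositions_length cs (base + 1)
      · rw [pvPositions, if_neg hs, List.filter_cons_of_pos (by simp [hs]), List.length_cons,
          List.length_cons, pvPositions_length cs (base + 1)]

theorem pvLower_length (s : List Char) : (PySem.Chars.lower s).length = s.length := by
  show (s.map PySem.Chars.lowerChar).length = s.length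
  simp

theorem pvLower_append (s t : List Char) :
    PySem.Chars.lower (s ++ t) = PySem.Chars.lower s ++ PySem.Chars.lower t := by
  show (s ++ t).map _ = s.map _ ++ t.map _
  simp

theorem pvLower_cons (c : Char) (s : List Char) :
    PySem.Chars.lower (c :: s) = PySem.Chars.lowerChar c :: PySem.Chars.lower s := rfl

-- core invariant of A's loop: with `seen` a strict (lowered) prefix of the target,
-- A succeeds iff the next `need` non-space characters lowered complete the target,
-- and then it cuts right after the position of the last of them
theorem pvLoopA_eq (text tlow : List Char) :
    ∀ (cs : List Char) (idx : Nat) (seen : List Char),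
    text.drop idx = cs →
    PySem.Chars.lower seen <+: tlow → seen.length < tlow.length →
    pvLoopA text tlow cs idx seen =
      (if tlow.length - seen.length ≤ (cs.filter (fun c => !PySem.Chars.isspace c)).length ∧
          PySem.Chars.lower ((cs.filter (fun c => !PySem.Chars.isspace c)).take
            (tlow.length - seen.length)) = tlow.drop seen.length
       then PySem.Chars.strip
         (text.drop ((pvPositions cs idx).getD (tlow.length - seen.length - 1) 0 + 1))
       else PySem.Chars.strip text)
  | [], idx, seen, _, _, hlen => by
      rw [if_neg]
      · rfl
      · rintro ⟨h1, -⟩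
        simp only [List.filter_nil, List.length_nil] at h1
        omega
  | ch :: rest, idx, seen, h, hpre, hlen => by
      have htail : text.drop (idx + 1) = rest := by
        rw [← List.drop_drop, h, List.drop_one, List.tail_cons]
      by_cases hs : PySem.Chars.isspace ch
      · rw [show pvLoopA text tlow (ch :: rest) idx seen
            = pvLoopA text tlow rest (idx + 1) seen by rw [pvLoopA, if_pos hs],
          pvLoopA_eq text tlow rest (idx + 1) seen htail hpre hlen,
          List.filter_cons_of_neg (by simp [hs]),
          show pvPositions (ch :: rest) idx = pvPositions rest (idx + 1) by
            rw [pvPositions, if_pos hs]]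
      · -- ch is not a space
        have hlowlen : (PySem.Chars.lower seen).length = seen.length := pvLower_length seen
        have happ : PySem.Chars.lower (seen ++ [ch]) =
            PySem.Chars.lower seen ++ [PySem.Chars.lowerChar ch] := pvLower_append seen [ch]
        have hdroplow : ∀ t, tlow = PySem.Chars.lower seen ++ t → tlow.drop seen.length = t := by
          intro t ht
          rw [ht, ← hlowlen, List.drop_left]
        have need_pos : 1 ≤ tlow.length - seen.length := by omega
        rw [List.filter_cons_of_pos (by simp [hs]),
          show pvPositions (ch :: rest) idx = idx :: pvPositions rest (idx + 1) by
            rw [pvPositions, if_neg hs]]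
        by_cases heq : PySem.Chars.lower (seen ++ [ch]) = tlow
        · -- A returns here
          have hlen1 : tlow.length = seen.length + 1 := by
            have := congrArg List.length heq
            rw [pvLower_length] at this
            simpa using this.symm
          have hneed : tlow.length - seen.length = 1 := by omega
          have hdrop : tlow.drop seen.length = [PySem.Chars.lowerChar ch] := by
            apply hdroplow; rw [← heq, happ]
          rw [show pvLoopA text tlow (ch :: rest) idx seen
              = PySem.Chars.strip (PySem.List.slice text (some ((idx : Int) + 1)) none) by
                rw [pvLoopA, if_neg hs, if_pos heq],
            show ((idx : Int) + 1) = ((idx + 1 : Nat) : Int) by push_cast; ring,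
            PySem.List.slice_from_natCast, hneed]
          rw [if_pos]
          · rfl
          · refine ⟨by simp, ?_⟩
            rw [List.take_succ_cons, List.take_zero, hdrop, pvLower_cons]
            rfl
        · by_cases hsw : PySem.Chars.startswith tlow (PySem.Chars.lower (seen ++ [ch])) = true
          · -- still a strict prefix: recurse
            have hpre' : PySem.Chars.lower (seen ++ [ch]) <+: tlow :=
              (PySem.Chars.startswith_iff tlow (PySem.Chars.lower (seen ++ [ch]))).1 hsw
            have hlen' : (seen ++ [ch]).length < tlow.length := by
              have hle := hpre'.length_le
              rw [pvLower_length] at hle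
              rcases Nat.lt_or_ge (seen ++ [ch]).length tlow.length with hlt | hge
              · exact hlt
              · exact absurd (List.IsPrefix.eq_of_length hpre' (by rw [pvLower_length]; omega)) heq
            have hlenapp : (seen ++ [ch]).length = seen.length + 1 := by simp
            obtain ⟨t, ht⟩ := hpre'
            have hdrop1 : tlow.drop seen.length = PySem.Chars.lowerChar ch :: t := by
              apply hdroplow; rw [← ht, happ]; simp
            have hdrop2 : tlow.drop (seen.length + 1) = t := by
              have h12 : tlow.drop (seen.length + 1) = (tlow.drop seen.length).drop 1 := by
                rw [List.drop_drop]
              rw [h12, hdrop1, List.drop_one, List.tail_cons]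
            have ih := pvLoopA_eq text tlow rest (idx + 1) (seen ++ [ch]) htail
              ⟨t, ht⟩ hlen'
            rw [show pvLoopA text tlow (ch :: rest) idx seen
                = pvLoopA text tlow rest (idx + 1) (seen ++ [ch]) by
                  rw [pvLoopA, if_neg hs, if_neg heq, if_pos hsw],
              ih, hlenapp, hdrop2]
            have hneed2 : 2 ≤ tlow.length - seen.length := by omega
            rw [show tlow.length - seen.length = (tlow.length - (seen.length + 1)) + 1 by omega,
              List.take_succ_cons, hdrop1, pvLower_cons]
            set need' := tlow.length - (seen.length + 1) with hneed'
            set ns' := rest.filter (fun c => !PySem.Chars.isspace c) with hns'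
            by_cases hc : need' ≤ ns'.length ∧ PySem.Chars.lower (ns'.take need') = t
            · rw [if_pos hc, if_pos ⟨by simp only [List.length_cons]; omega, by rw [hc.2]⟩,
                show need' + 1 - 1 = (need' - 1) + 1 by omega, List.getD_cons_succ]
            · rw [if_neg hc, if_neg]
              rintro ⟨h1, h2⟩
              exact hc ⟨by simpa using h1, ((List.cons.injEq _ _ _ _).mp h2).2⟩
          · -- mismatch: break
            rw [show pvLoopA text tlow (ch :: rest) idx seen = PySem.Chars.strip text by
              rw [pvLoopA, if_neg hs, if_neg heq, if_neg (by simpa using hsw)]]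
            rw [if_neg]
            rintro ⟨h1, h2⟩
            apply hsw
            rw [PySem.Chars.startswith_iff]
            obtain ⟨t0, ht0⟩ := hpre
            have hdrop0 : tlow.drop seen.length = t0 := hdroplow t0 ht0.symm
            rw [show tlow.length - seen.length = (tlow.length - seen.length - 1) + 1 by omega,
              List.take_succ_cons, pvLower_cons, hdrop0] at h2
            refine ⟨PySem.Chars.lower ((rest.filter (fun c => !PySem.Chars.isspace c)).take
              (tlow.length - seen.length - 1)), ?_⟩
            rw [happ, List.append_assoc, List.singleton_append, h2, ht0]

-- A with an empty target never matches: the first non-space char already overshoots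
theorem pvLoopA_nil_tlow (text : List Char) :
    ∀ (cs : List Char) (idx : Nat) (seen : List Char),
    pvLoopA text [] cs idx seen = PySem.Chars.strip text
  | [], _, _ => rfl
  | ch :: rest, idx, seen => by
      by_cases hs : PySem.Chars.isspace ch
      · rw [pvLoopA, if_pos hs]
        exact pvLoopA_nil_tlow text rest (idx + 1) seen
      · have h1 : PySem.Chars.lower (seen ++ [ch]) ≠ ([] : List Char) := by
          rw [pvLower_append]
          simp [pvLower_cons]
        have h2 : ¬ PySem.Chars.startswith ([] : List Char)
            (PySem.Chars.lower (seen ++ [ch])) = true := by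
          rw [PySem.Chars.startswith_iff]
          intro hp
          exact h1 (List.prefix_nil.1 hp)
        rw [pvLoopA, if_neg hs, if_neg h1, if_neg h2]

-- ===== VERDICT (by name: the statement is the Claim_ definition above) =====
theorem extract_team_remainder_py_spec : Claim_equal_extract_team_remainder_py := by
  intro text_line compact_team _
  unfold Spec_extract_team_remainder_py extract_team_remainder_py extract_team_remainder_py_alt
  set tl := text_line.toList
  set ct := compact_team.toList
  by_cases hn : ct.length = 0
  · have hct : ct = [] := List.length_eq_zero_iff.1 hn
    rw [hct, show PySem.Chars.lower ([] : List Char) = [] from rfl,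
      pvLoopA_nil_tlow tl tl 0 []]
    simp
  · have hmap := pvPositions_map_getD tl tl 0 (by simp)
    have hlenp := pvPositions_length tl 0
    have heq := pvLoopA_eq tl (PySem.Chars.lower ct) tl 0 []
      (by simp) List.nil_prefix (by simp only [List.length_nil, pvLower_length]; omega)
    rw [heq]
    simp only [List.drop_zero, List.length_nil, Nat.sub_zero, pvLower_length]
    have hcompact : ((pvPositions tl 0).take ct.length).map (fun i => tl.getD i ' ') =
        (tl.filter (fun c => !PySem.Chars.isspace c)).take ct.length := by
      rw [List.map_take, hmap]
    simp only [hcompact, hlenp]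
    split_ifs with h1 h2 h2
    · rfl
    · exact absurd ⟨hn, h1.1, h1.2⟩ h2
    · exact absurd ⟨h2.2.1, h2.2.2⟩ h1
    · rfl
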